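-- pv_equiv track=rewrite | github.com/momo1606/Takhteet | old/takhteet.py | ayat
-- ===== SOURCE A (Python) =====
-- def ayat(q):
--     def enToArNumb(number):
--         dic = {
--             0:'۰',
--             1:'١',
--             2:'٢',
--             3:'۳',
--             4:'٤',
--             5:'۵',
--             6:'٦',
--             7:'۷',
--             8:'۸',
--             9:'۹',
--         }
--         return dic.get(number)
--     fin=""
--     while(q>0):
--         a=q%10
--         q=q//10
--         l=enToArNumb(a)
--         fin=fin+l
--     return (fin[::-1])
-- ===== SOURCE B (Python) =====
-- def ayat(q):
--     if q <= 0: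
--         return ""
--     dic = {
--         '0': '\u06f0',
--         '1': '\u0661',
--         '2': '\u0662',
--         '3': '\u06f3',
--         '4': '\u0664',
--         '5': '\u06f5',
--         '6': '\u0666',
--         '7': '\u06f7',
--         '8': '\u06f8',
--         '9': '\u06f9',
--     }
--     return "".join(dic[c] for c in str(q))
-- ===== Notes on version B (the rewrite author's own statement) =====
-- stated objective: idiomatic
-- what changed: Replaces the modulus/quotient digit-extraction loop with reversed accumulation by a single pass over str(q), mapping each decimal character through a char-keyed dictionary and joining; no arithmetic loop and no final reversal.
import Mathlib
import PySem

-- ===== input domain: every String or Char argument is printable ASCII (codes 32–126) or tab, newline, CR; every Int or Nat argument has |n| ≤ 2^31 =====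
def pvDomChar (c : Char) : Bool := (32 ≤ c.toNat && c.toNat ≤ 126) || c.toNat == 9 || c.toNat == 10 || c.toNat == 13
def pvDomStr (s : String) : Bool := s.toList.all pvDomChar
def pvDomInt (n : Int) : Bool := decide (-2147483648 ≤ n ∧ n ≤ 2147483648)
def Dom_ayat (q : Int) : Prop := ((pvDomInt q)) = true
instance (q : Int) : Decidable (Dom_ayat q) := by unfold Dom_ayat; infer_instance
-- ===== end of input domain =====

-- B replaces A's %10-//10 extraction loop and final reversal with one left-to-right pass over str(q) joined through a char-keyed digit map (idiomatic; return value only).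

-- ===== PORT A =====
def aDic : PySem.Dict Int String :=
  PySem.Dict.ofList [(0, "۰"), (1, "١"), (2, "٢"), (3, "۳"), (4, "٤"), (5, "۵"), (6, "٦"), (7, "۷"), (8, "۸"), (9, "۹")]

def enToArNumb (number : Int) : Option String := PySem.Dict.get? aDic number

-- the while loop of A; `.getD ""` is never taken: the looked-up digit is always 0..9
def ayatLoop (q : Int) (fin : String) : String :=
  if h : q > 0 then
    ayatLoop (PySem.Int.floordiv q 10) (fin ++ (enToArNumb (PySem.Int.mod q 10)).getD "")
  else fin
termination_by q.toNat
decreasing_by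
  have h1 : 0 ≤ PySem.Int.floordiv q 10 := by
    have := (PySem.Int.le_floordiv_iff_mul_le (a := q) (b := 10) (q := 0) (by omega))
    omega
  have h2 : PySem.Int.floordiv q 10 < q := by
    have := (PySem.Int.floordiv_lt_iff_lt_mul (a := q) (b := 10) (q := q) (by omega))
    omega
  omega

def ayat (q : Int) : String := (PySem.Str.slice? (ayatLoop q "") none none (-1)).getD ""

-- ===== PORT B =====
def bDic : PySem.Dict Char String :=
  PySem.Dict.ofList [('0', "۰"), ('1', "١"), ('2', "٢"), ('3', "۳"), ('4', "٤"), ('5', "۵"), ('6', "٦"), ('7', "۷"), ('8', "۸"), ('9', "۹")]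

-- `.getD ""` is never taken: str(q) of a positive int consists of decimal digits
def ayat_alt (q : Int) : String :=
  if q ≤ 0 then ""
  else PySem.Str.join "" ((PySem.Int.toStr q).toList.map (fun c => (PySem.Dict.get? bDic c).getD ""))

-- ===== PRECONDITION & SPEC =====
def Spec_ayat (q : Int) (out : String) : Prop := out = ayat_alt q
instance (q : Int) (out : String) : Decidable (Spec_ayat q out) := by unfold Spec_ayat; infer_instance

-- ===== CLAIM (what is proved, stated in full; the proofs are below) =====
def Claim_equal_ayat : Prop := ∀ (q : Int), Dom_ayat q → Spec_ayat q (ayat q)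

-- ===== LEMMAS AND PROOFS =====

-- the single Arabic digit character for a decimal digit character
def arbC (c : Char) : Char := match c with
  | '0' => '۰' | '1' => '١' | '2' => '٢' | '3' => '۳' | '4' => '٤' | '5' => '۵' | '6' => '٦' | '7' => '۷' | '8' => '۸' | _ => '۹'

-- MSB-first decimal digit characters of n (the contract of Nat.toDigits 10)
def decChars (n : Nat) : List Char :=
  if h : n < 10 then [Nat.digitChar n]
  else decChars (n / 10) ++ [Nat.digitChar (n % 10)]
decreasing_by exact Nat.div_lt_self (by omega) (by omega)

theorem toDigitsCore_eq (fuel : Nat) : ∀ n acc, n < fuel →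
    Nat.toDigitsCore 10 fuel n acc = decChars n ++ acc := by
  induction fuel with
  | zero => intro n acc h; omega
  | succ fuel ih =>
    intro n acc h
    rw [Nat.toDigitsCore]
    by_cases h10 : n / 10 = 0
    · have hlt : n < 10 := by omega
      rw [decChars]
      simp [h10, hlt, Nat.mod_eq_of_lt hlt]
    · have hge : ¬ n < 10 := by omega
      rw [decChars]
      simp only [h10, hge, if_false, dite_false]
      rw [ih (n / 10) _ (by omega)]
      simp

theorem toDigits_eq (n : Nat) : Nat.toDigits 10 n = decChars n := by
  rw [Nat.toDigits, toDigitsCore_eq (n + 1) n [] (by omega)]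
  simp

theorem mem_decChars (n : Nat) : ∀ c ∈ decChars n, ∃ d, d < 10 ∧ c = Nat.digitChar d := by
  induction n using Nat.strong_induction_on with
  | _ n ih =>
    intro c hc
    rw [decChars] at hc
    by_cases h10 : n < 10
    · simp only [h10, dite_true, List.mem_singleton] at hc
      exact ⟨n, h10, hc⟩
    · simp only [h10, dite_false, List.mem_append, List.mem_singleton] at hc
      rcases hc with hc | hc
      · exact ih (n / 10) (Nat.div_lt_self (by omega) (by omega)) c hc
      · exact ⟨n % 10, by omega, hc⟩

theorem aDic_digit (d : Nat) (hd : d < 10) :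
    (enToArNumb (d : Int)).getD "" = String.ofList [arbC (Nat.digitChar d)] := by
  interval_cases d <;> rfl

theorem bDic_digit (d : Nat) (hd : d < 10) :
    ((PySem.Dict.get? bDic (Nat.digitChar d)).getD "").toList = [arbC (Nat.digitChar d)] := by
  interval_cases d <;> rfl

theorem loop_stop (fin : String) : ayatLoop 0 fin = fin := by
  rw [ayatLoop]; simp

theorem floordiv_natCast_ten (n : Nat) : PySem.Int.floordiv (n : Int) 10 = ((n / 10 : Nat) : Int) := by
  rw [PySem.Int.floordiv_eq_iff_of_pos (by omega)]
  constructor <;> push_cast <;> omega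

theorem mod_natCast_ten (n : Nat) : PySem.Int.mod (n : Int) 10 = ((n % 10 : Nat) : Int) := by
  simp [pysem]

theorem loop_eq : ∀ n : Nat, 0 < n → ∀ fin : String,
    (ayatLoop (n : Int) fin).toList = fin.toList ++ ((decChars n).map arbC).reverse := by
  intro n
  induction n using Nat.strong_induction_on with
  | _ n ih =>
    intro hn fin
    rw [ayatLoop, dif_pos (by exact_mod_cast hn), floordiv_natCast_ten, mod_natCast_ten,
      aDic_digit (n % 10) (by omega)]
    by_cases h10 : n < 10
    · have hz : n / 10 = 0 := by omega
      rw [hz, Nat.cast_zero, loop_stop, decChars]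
      simp [h10, Nat.mod_eq_of_lt h10, String.toList_append]
    · rw [ih (n / 10) (Nat.div_lt_self (by omega) (by omega)) (by omega)]
      conv_rhs => rw [decChars]
      simp [h10, String.toList_append]

-- ===== VERDICT (by name: the statement is the Claim_ definition above) =====
theorem toList_alt (n : Nat) (hn : 0 < n) :
    (ayat_alt (n : Int)).toList = (decChars n).map arbC := by
  unfold ayat_alt
  rw [if_neg (show ¬ (n : Int) ≤ 0 by omega)]
  have hcs : (PySem.Int.toStr (n : Int)).toList = decChars n := by
    rw [PySem.Int.toList_toStr]
    simp only [PySem.Int.toChars]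
    rw [if_neg (by omega)]
    simp [toDigits_eq]
  rw [PySem.Str.toList_join, hcs]
  have hmap : (decChars n).map (fun c => ((PySem.Dict.get? bDic c).getD "").toList)
      = ((decChars n).map arbC).map (fun c => [c]) := by
    rw [List.map_map]
    apply List.map_congr_left
    intro c hc
    obtain ⟨d, hd, rfl⟩ := mem_decChars n c hc
    simpa using bDic_digit d hd
  rw [List.map_map]
  simp only [Function.comp_def]
  rw [hmap, String.toList_empty, PySem.Chars.join_nil_singletons]

theorem ayat_spec : Claim_equal_ayat := by
  unfold Claim_equal_ayat
  intro q _
  unfold Spec_ayat ayat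
  by_cases hq : q ≤ 0
  · rw [ayatLoop, dif_neg (by omega)]
    rw [PySem.Str.slice?_none_none_neg_one]
    unfold ayat_alt
    rw [if_pos hq]
    rfl
  · obtain ⟨n, rfl⟩ : ∃ n : Nat, q = (n : Int) := ⟨q.toNat, by omega⟩
    have hn : 0 < n := by omega
    rw [PySem.Str.slice?_none_none_neg_one, Option.getD_some]
    have h1 : (ayatLoop (n : Int) "").toList = ((decChars n).map arbC).reverse := by
      rw [loop_eq n hn "", String.toList_empty, List.nil_append]
    rw [h1, List.reverse_reverse, ← toList_alt n hn, String.ofList_toList]
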